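-- pv_equiv track=rewrite | github.com/usernamelzr/cipher-auto-search-tool | cipher-auto-search-tool/src/main_idc.py | generate_diff_pool_rc5
-- ===== SOURCE A (Python) =====
-- def generate_diff_pool_rc5(cipher_block_size):
--     word_size = cipher_block_size // 2
--     diff_pool_input = []
--     for i in range(word_size):
--         diff_val = [0] * cipher_block_size
--         diff_val[i] = 1
--         diff_val[i + word_size] = 1
--         diff_pool_input.append(diff_val)
--     diff_pool_output = []
--     for i in range(cipher_block_size):
--         diff_val = [0] * cipher_block_size
--         diff_val[i] = 1
--         diff_pool_output.append(diff_val)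
--     return diff_pool_input, diff_pool_output
-- ===== SOURCE B (Python) =====
-- def generate_diff_pool_rc5(cipher_block_size):
--     word_size = cipher_block_size // 2
--     # each one-hot row is the previous one rotated right by one position
--     diff_pool_output = []
--     if cipher_block_size > 0:
--         row = [1] + [0] * (cipher_block_size - 1)
--         for _ in range(cipher_block_size):
--             diff_pool_output.append(row)
--             row = row[-1:] + row[:-1]
--     # an input row is the elementwise sum of the two output rows it combines
--     diff_pool_input = [[a + b for a, b in zip(diff_pool_output[i], diff_pool_output[i + word_size])]
--                        for i in range(word_size)]
--     return diff_pool_input, diff_pool_output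
-- ===== Notes on version B (the rewrite author's own statement) =====
-- stated objective: alternative
-- what changed: B generates the output pool by iterated right rotation of a single seed row (each one-hot row is the previous row rotated by one) and derives each input row as the elementwise zip-sum of two output rows, instead of A's two independent loops that allocate fresh zero lists and set indices in place.
import Mathlib
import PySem

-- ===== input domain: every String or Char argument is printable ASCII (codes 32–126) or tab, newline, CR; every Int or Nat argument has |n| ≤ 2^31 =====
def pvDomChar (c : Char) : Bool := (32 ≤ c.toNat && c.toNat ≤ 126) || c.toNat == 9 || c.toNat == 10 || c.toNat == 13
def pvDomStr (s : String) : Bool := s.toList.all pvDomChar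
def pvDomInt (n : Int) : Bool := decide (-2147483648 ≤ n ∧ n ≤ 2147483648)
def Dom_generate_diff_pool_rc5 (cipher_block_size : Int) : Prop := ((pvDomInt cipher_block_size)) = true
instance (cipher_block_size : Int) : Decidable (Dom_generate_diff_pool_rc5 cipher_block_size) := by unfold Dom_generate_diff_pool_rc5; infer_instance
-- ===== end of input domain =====

-- B generates the output rows by iterated right rotation of a single seed row and derives each
-- input row as the elementwise sum of two output rows, instead of A's two independent loops that
-- allocate zero lists and assign indices in place (objective: alternative, same cost).

-- ===== PORT A =====
def generate_diff_pool_rc5 (cipher_block_size : Int) : List (List Int) × List (List Int) :=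
  let word_size := PySem.Int.floordiv cipher_block_size 2
  let diff_pool_input := (PySem.List.pyRange 0 word_size 1).foldl (fun acc i =>
    let diff_val := PySem.List.pyRepeat [(0 : Int)] cipher_block_size
    let diff_val := PySem.List.pySetD diff_val i 1
    let diff_val := PySem.List.pySetD diff_val (i + word_size) 1
    acc ++ [diff_val]) []
  let diff_pool_output := (PySem.List.pyRange 0 cipher_block_size 1).foldl (fun acc i =>
    let diff_val := PySem.List.pyRepeat [(0 : Int)] cipher_block_size
    let diff_val := PySem.List.pySetD diff_val i 1
    acc ++ [diff_val]) []
  (diff_pool_input, diff_pool_output)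

-- ===== PORT B =====
-- row[-1:] + row[:-1]  (the right rotation inside Source B's loop)
def pvRot (row : List Int) : List Int :=
  PySem.List.slice row (some (-1)) none ++ PySem.List.slice row none (some (-1))

def generate_diff_pool_rc5_alt (cipher_block_size : Int) : List (List Int) × List (List Int) :=
  let word_size := PySem.Int.floordiv cipher_block_size 2
  let diff_pool_output :=
    if cipher_block_size > 0 then
      ((PySem.List.pyRange 0 cipher_block_size 1).foldl
        (fun (p : List (List Int) × List Int) _ => (p.1 ++ [p.2], pvRot p.2))
        ([], [(1 : Int)] ++ PySem.List.pyRepeat [(0 : Int)] (cipher_block_size - 1))).1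
    else []
  let diff_pool_input := (PySem.List.pyRange 0 word_size 1).map (fun i =>
    (List.zip (PySem.List.pyGetD diff_pool_output i [])
              (PySem.List.pyGetD diff_pool_output (i + word_size) [])).map
      (fun ab => ab.1 + ab.2))
  (diff_pool_input, diff_pool_output)

-- ===== PRECONDITION & SPEC =====
def Spec_generate_diff_pool_rc5 (cipher_block_size : Int) (out : List (List Int) × List (List Int)) : Prop := out = generate_diff_pool_rc5_alt cipher_block_size
instance (cipher_block_size : Int) (out : List (List Int) × List (List Int)) : Decidable (Spec_generate_diff_pool_rc5 cipher_block_size out) := by unfold Spec_generate_diff_pool_rc5; infer_instance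

-- ===== CLAIM (what is proved, stated in full; the proofs are below) =====
def Claim_equal_generate_diff_pool_rc5 : Prop := ∀ (cipher_block_size : Int), Dom_generate_diff_pool_rc5 cipher_block_size → Spec_generate_diff_pool_rc5 cipher_block_size (generate_diff_pool_rc5 cipher_block_size)

-- ===== LEMMAS AND PROOFS =====

-- the one-hot row of width n with the 1 at position i
def pvOh (n i : Nat) : List Int := List.replicate i 0 ++ [(1 : Int)] ++ List.replicate (n - 1 - i) 0

-- a one-hot list built by concatenation equals a [0]*n list with one position set
theorem pv_rep_set (a b : Nat) :
    List.replicate a (0 : Int) ++ [(1 : Int)] ++ List.replicate b (0 : Int)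
      = (List.replicate (a + 1 + b) (0 : Int)).set a 1 := by
  induction a with
  | zero =>
    rw [show 1 + b = b + 1 by omega]
    simp [List.replicate_succ]
  | succ n ih =>
    rw [show n + 1 + 1 + b = (n + 1 + b) + 1 by omega]
    simp only [List.replicate_succ, List.cons_append, List.set_cons_succ]
    exact congrArg (List.cons 0) ih

theorem pv_oh_set (n i : Nat) (h : i < n) :
    pvOh n i = (List.replicate n (0 : Int)).set i 1 := by
  unfold pvOh
  rw [pv_rep_set]
  congr 2
  omega

-- rotating any row right by one: last element to the front
theorem pv_rot_snoc (ys : List Int) (c : Int) : pvRot (ys ++ [c]) = c :: ys := by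
  unfold pvRot
  rw [PySem.List.slice_from_neg_one, PySem.List.slice_to_neg_one]
  simp

-- the rotation steps a one-hot row to the next position, cyclically
theorem pv_rot_oh (n i : Nat) (hn : 0 < n) (hi : i < n) :
    pvRot (pvOh n i) = pvOh n ((i + 1) % n) := by
  rcases Nat.lt_or_ge (i + 1) n with h | h
  · have hsplit : pvOh n i = (List.replicate i (0 : Int) ++ [(1 : Int)] ++ List.replicate (n - 1 - (i + 1)) 0) ++ [(0 : Int)] := by
      unfold pvOh
      have he : n - 1 - i = (n - 1 - (i + 1)) + 1 := by omega
      rw [he, List.replicate_succ' (n := n - 1 - (i + 1))]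
      simp
    rw [hsplit, pv_rot_snoc, Nat.mod_eq_of_lt h]
    unfold pvOh
    simp [List.replicate_succ]
  · have hin : i + 1 = n := by omega
    have hsplit : pvOh n i = List.replicate (n - 1) (0 : Int) ++ [(1 : Int)] := by
      unfold pvOh
      have : n - 1 - i = 0 := by omega
      rw [this]
      simp
      omega
    rw [hsplit, pv_rot_snoc, hin, Nat.mod_self]
    unfold pvOh
    simp

-- the rotation loop after m ≤ n steps: rows 0 … m-1 collected, current row one-hot at m mod n
theorem pv_loop (n : Nat) (hn : 0 < n) (m : Nat) (hm : m ≤ n) :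
    (PySem.List.pyRange 0 (m : Int) 1).foldl
        (fun (p : List (List Int) × List Int) _ => (p.1 ++ [p.2], pvRot p.2))
        ([], pvOh n 0)
      = ((List.range m).map (pvOh n), pvOh n (m % n)) := by
  induction m with
  | zero =>
    rw [PySem.List.pyRange_one_eq_nil (by omega)]
    simp
  | succ k ih =>
    have hcast : ((k + 1 : Nat) : Int) = (k : Int) + 1 := by push_cast; ring
    rw [hcast, PySem.List.pyRange_one_succ_right (by positivity), List.foldl_append,
        ih (by omega)]
    have hk : k % n = k := Nat.mod_eq_of_lt (by omega)
    simp only [List.foldl_cons, List.foldl_nil, hk]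
    rw [pv_rot_oh n k hn (by omega), List.range_succ]
    simp

-- B's zip-sum of two one-hot rows is A's two-hot row
theorem pv_zip_sum (n i j : Nat) (hij : i < j) (hj : j < n) :
    (List.zip (pvOh n i) (pvOh n j)).map (fun ab => ab.1 + ab.2)
      = ((List.replicate n (0 : Int)).set i 1).set j 1 := by
  rw [pv_oh_set n i (by omega), pv_oh_set n j hj]
  apply List.ext_getElem
  · simp
  · intro k hk hk'
    simp only [List.map_zip_eq_zipWith, List.getElem_zipWith, Function.curry_apply,
               List.getElem_set, List.getElem_replicate]
    split_ifs <;> omega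

-- A's one-hot construction at a nonnegative in-range Int index, as pvOh
theorem pv_setrow (n i : Int) (h0 : 0 ≤ i) (h1 : i < n) :
    PySem.List.pySetD (PySem.List.pyRepeat [(0 : Int)] n) i 1 = pvOh n.toNat i.toNat := by
  rw [PySem.List.pyRepeat_singleton, PySem.List.pySetD_of_nonneg _ _ h0,
      pv_oh_set n.toNat i.toNat (by omega)]

-- ===== VERDICT (by name: the statement is the Claim_ definition above) =====
theorem generate_diff_pool_rc5_spec : Claim_equal_generate_diff_pool_rc5 := by
  intro cbs _
  unfold Spec_generate_diff_pool_rc5 generate_diff_pool_rc5 generate_diff_pool_rc5_alt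
  simp only [PySem.List.foldl_append_singleton_eq_map, List.nil_append]
  rcases le_or_gt cbs 0 with hneg | hpos
  · have hws : PySem.Int.floordiv cbs 2 ≤ 0 := by
      have := PySem.Int.floordiv_mul_add_mod cbs 2
      have hm := PySem.Int.mod_nonneg (a := cbs) (b := 2) (by omega)
      have hm2 := PySem.Int.mod_lt (a := cbs) (b := 2) (by omega)
      omega
    rw [PySem.List.pyRange_one_eq_nil hws, PySem.List.pyRange_one_eq_nil hneg,
        if_neg (by omega)]
    simp
  · -- output pools agree
    have hn0 : (0 : Int) < (cbs.toNat : Int) := by omega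
    have hout : (PySem.List.pyRange 0 cbs 1).map
        (fun i => PySem.List.pySetD (PySem.List.pyRepeat [(0 : Int)] cbs) i 1)
        = (List.range cbs.toNat).map (pvOh cbs.toNat) := by
      rw [PySem.List.pyRange_one, show cbs - (0 : Int) = cbs from by ring]
      rw [List.map_map]
      apply List.map_congr_left
      intro k hk
      rw [List.mem_range] at hk
      simp only [Function.comp_apply]
      rw [pv_setrow cbs ((0 : Int) + (k : Int)) (by omega) (by omega)]
      congr 1
      omega
    have hseed : [(1 : Int)] ++ PySem.List.pyRepeat [(0 : Int)] (cbs - 1) = pvOh cbs.toNat 0 := by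
      rw [PySem.List.pyRepeat_singleton]
      unfold pvOh
      simp only [List.replicate_zero, List.nil_append, List.cons_append]
      congr 2
      omega
    have hloop : ((PySem.List.pyRange 0 cbs 1).foldl
        (fun (p : List (List Int) × List Int) _ => (p.1 ++ [p.2], pvRot p.2))
        ([], [(1 : Int)] ++ PySem.List.pyRepeat [(0 : Int)] (cbs - 1))).1
        = (List.range cbs.toNat).map (pvOh cbs.toNat) := by
      rw [hseed, show cbs = ((cbs.toNat : Nat) : Int) by omega]
      simp only [Int.toNat_natCast]
      rw [pv_loop cbs.toNat (by omega) cbs.toNat le_rfl]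
    rw [if_pos (by omega), hloop, hout]
    refine Prod.ext ?_ rfl
    -- input pools agree
    simp only
    apply List.map_congr_left
    intro i hi
    rw [PySem.List.mem_pyRange_one] at hi
    have hws2 : 2 * PySem.Int.floordiv cbs 2 ≤ cbs := by
      have := PySem.Int.floordiv_mul_add_mod cbs 2
      have hm := PySem.Int.mod_nonneg (a := cbs) (b := 2) (by omega)
      omega
    have h0i : 0 ≤ i := hi.1
    have hiw : i < PySem.Int.floordiv cbs 2 := hi.2
    have hjn : i + PySem.Int.floordiv cbs 2 < cbs := by omega
    rw [PySem.List.pyGetD_of_nonneg _ _ h0i, PySem.List.pyGetD_of_nonneg _ _ (by omega),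
        PySem.List.getD_map_range _ _ _ _ (by omega),
        PySem.List.getD_map_range _ _ _ _ (by omega)]
    rw [pv_setrow cbs i h0i (by omega)]
    have hj : (i + PySem.Int.floordiv cbs 2).toNat = i.toNat + (PySem.Int.floordiv cbs 2).toNat := by omega
    rw [show PySem.List.pySetD (pvOh cbs.toNat i.toNat) (i + PySem.Int.floordiv cbs 2) 1
          = ((List.replicate cbs.toNat (0 : Int)).set i.toNat 1).set
              (i.toNat + (PySem.Int.floordiv cbs 2).toNat) 1 by
        rw [PySem.List.pySetD_of_nonneg _ _ (by omega : (0:Int) ≤ i + PySem.Int.floordiv cbs 2),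
            pv_oh_set cbs.toNat i.toNat (by omega), hj]]
    rw [hj]
    exact (pv_zip_sum cbs.toNat i.toNat (i.toNat + (PySem.Int.floordiv cbs 2).toNat)
          (by omega) (by omega)).symm
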